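-- pv_equiv track=rewrite | github.com/shuckerino/Uni | SeqAlg/Chapter03/Lab03/g_c_relation.py | calculate_g_c_diff_recursive
-- ===== SOURCE A (Python) =====
-- def calculate_g_c_diff_recursive(sequence : str, values: list) -> list:
--
--     if sequence == "":
--         return values
--
--     if len(values) > 0:
--         last_diff = values[-1]
--     else:
--         last_diff = 0
--
--     current_diff = 0
--     if sequence[0] == "C":
--         current_diff -= 1
--     elif sequence[0] == "G":
--         current_diff += 1
--     values.append(last_diff + current_diff) # write the updated value at the end of the list
--     return calculate_g_c_diff_recursive(sequence[1:], values)
-- ===== SOURCE B (Python) =====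
-- def calculate_g_c_diff_recursive(sequence: str, values: list) -> list:
--     # Single O(n) pass with a running sum (A rebuilds sequence[1:] each call, O(n^2)).
--     # Like A, this appends the new entries to `values` in place and returns it.
--     run = values[-1] if values else 0
--     out = []
--     for ch in sequence:
--         run += (ch == "G") - (ch == "C")
--         out.append(run)
--     values.extend(out)
--     return values
-- ===== Notes on version B (the rewrite author's own statement) =====
-- stated objective: faster
-- what changed: Replaced the recursion that re-slices sequence[1:] and re-reads values[-1] each call with one iterative pass keeping a running sum, then a single extend.
import Mathlib
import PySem

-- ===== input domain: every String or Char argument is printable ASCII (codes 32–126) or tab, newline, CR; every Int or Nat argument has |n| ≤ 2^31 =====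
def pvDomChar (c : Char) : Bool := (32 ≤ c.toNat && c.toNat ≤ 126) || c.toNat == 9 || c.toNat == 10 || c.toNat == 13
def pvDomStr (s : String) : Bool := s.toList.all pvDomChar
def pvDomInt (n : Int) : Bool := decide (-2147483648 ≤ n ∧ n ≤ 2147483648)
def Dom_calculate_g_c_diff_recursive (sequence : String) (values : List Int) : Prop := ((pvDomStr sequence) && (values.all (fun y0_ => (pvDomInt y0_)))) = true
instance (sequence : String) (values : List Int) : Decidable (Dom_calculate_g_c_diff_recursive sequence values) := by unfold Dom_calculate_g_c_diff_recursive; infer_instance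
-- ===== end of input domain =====

-- ===== PORT A =====
-- recursion of A, on the sequence's character list (sequence == "" ↔ [], sequence[0] ↔ head, sequence[1:] ↔ tail)
def pvGoA : List Char → List Int → List Int
  | [], values => values
  | c :: rest, values =>
    let last_diff : Int := (values.getLast?).getD 0
    let current_diff : Int := if c = 'C' then (0 : Int) - 1 else if c = 'G' then (0 : Int) + 1 else 0
    pvGoA rest (values ++ [last_diff + current_diff])

def calculate_g_c_diff_recursive (sequence : String) (values : List Int) : List Int :=
  pvGoA sequence.toList values

-- ===== PORT B =====
-- B's loop over the characters with the running sum `run`, building `out`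
def pvGoB : List Char → Int → List Int
  | [], _ => []
  | c :: rest, run =>
    let run' : Int := run + (if c = 'G' then (1:Int) else 0) - (if c = 'C' then (1:Int) else 0)
    run' :: pvGoB rest run'

def calculate_g_c_diff_recursive_alt (sequence : String) (values : List Int) : List Int :=
  values ++ pvGoB sequence.toList ((values.getLast?).getD 0)

-- ===== PRECONDITION & SPEC =====
def Spec_calculate_g_c_diff_recursive (sequence : String) (values : List Int) (out : List Int) : Prop := out = calculate_g_c_diff_recursive_alt sequence values
instance (sequence : String) (values : List Int) (out : List Int) : Decidable (Spec_calculate_g_c_diff_recursive sequence values out) := by unfold Spec_calculate_g_c_diff_recursive; infer_instance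

-- ===== CLAIM (what is proved, stated in full; the proofs are below) =====
def Claim_equal_calculate_g_c_diff_recursive : Prop := ∀ (sequence : String) (values : List Int), Dom_calculate_g_c_diff_recursive sequence values → Spec_calculate_g_c_diff_recursive sequence values (calculate_g_c_diff_recursive sequence values)

-- ===== LEMMAS AND PROOFS =====

-- ===== VERDICT (by name: the statement is the Claim_ definition above) =====
theorem pvGoA_eq_goB (cs : List Char) : ∀ (values : List Int),
    pvGoA cs values = values ++ pvGoB cs ((values.getLast?).getD 0) := by
  induction cs with
  | nil => intro values; simp [pvGoA, pvGoB]
  | cons c rest ih =>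
    intro values
    simp only [pvGoA, pvGoB, ih, List.getLast?_append]
    have key : values.getLast?.getD 0 + (if c = 'C' then (-1:Int) else if c = 'G' then 1 else 0)
        = (values.getLast?.getD 0 + if c = 'G' then (1:Int) else 0) - (if c = 'C' then (1:Int) else 0) := by
      by_cases h1 : c = 'C' <;> by_cases h2 : c = 'G' <;> simp_all <;> omega
    rw [← key]
    simp

theorem calculate_g_c_diff_recursive_spec : Claim_equal_calculate_g_c_diff_recursive := by
  intro sequence values _
  show _ = _
  simp [calculate_g_c_diff_recursive, calculate_g_c_diff_recursive_alt, pvGoA_eq_goB]
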